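-- pv_equiv track=rewrite | github.com/jiaobendaye/mianshi | pingan/test3.py | helper
-- ===== SOURCE A (Python) =====
-- from collections import Counter
--
-- def helper(s1, s2):
--     count1 = Counter(s1)
--     count2 = Counter(s2)
--     for key in count2.keys():
--         v2 = count2[key]
--         v1 = count1[key]
--         if v2 > v1:
--             return False
--     return True
-- ===== SOURCE B (Python) =====
-- def helper(s1, s2):
--     t1 = sorted(s1)
--     t2 = sorted(s2)
--     j = 0
--     for c in t2:
--         while j < len(t1) and t1[j] < c:
--             j += 1
--         if j == len(t1) or t1[j] != c:
--             return False
--         j += 1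
--     return True
-- ===== Notes on version B (the rewrite author's own statement) =====
-- stated objective: alternative
-- what changed: B uses no counting table at all: it sorts both strings and runs a two-pointer merge scan, greedily matching each character of sorted(s2) against sorted(s1), instead of building Counters and comparing per-key counts.
import Mathlib
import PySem

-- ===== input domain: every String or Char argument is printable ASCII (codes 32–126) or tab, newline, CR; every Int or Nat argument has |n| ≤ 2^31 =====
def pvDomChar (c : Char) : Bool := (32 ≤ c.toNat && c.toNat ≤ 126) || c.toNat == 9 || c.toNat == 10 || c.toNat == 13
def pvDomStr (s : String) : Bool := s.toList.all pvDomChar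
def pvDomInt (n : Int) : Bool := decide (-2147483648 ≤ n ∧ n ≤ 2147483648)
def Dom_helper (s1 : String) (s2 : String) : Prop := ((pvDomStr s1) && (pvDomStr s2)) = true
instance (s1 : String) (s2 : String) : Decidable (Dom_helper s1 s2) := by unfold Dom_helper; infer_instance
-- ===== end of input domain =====

-- B replaces A's Counter comparison by a counting-free algorithm: sort both strings
-- and greedily match sorted(s2) against sorted(s1) with a two-pointer merge scan.

-- ===== PORT A =====
-- the 'for key in count2.keys(): … return False' loop of A
def helperLoop (count1 count2 : PySem.Dict Char Int) : List Char → Bool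
  | [] => true
  | key :: ks =>
    let v2 := count2.getD key 0   -- Counter lookup defaults to 0
    let v1 := count1.getD key 0
    if v1 < v2 then false else helperLoop count1 count2 ks

def helper (s1 : String) (s2 : String) : Bool :=
  let count1 := PySem.Dict.counter s1.toList
  let count2 := PySem.Dict.counter s2.toList
  helperLoop count1 count2 count2.keys

-- ===== PORT B =====
-- B's loop over t2 with the inner 'while t1[j] < c: j += 1' advance, written as the
-- merge recursion on (rest of t2, rest of t1 from j): advance in t1 while its head is
-- smaller, consume a match on equality, fail on mismatch or exhausted t1.
def mergeScan : List Char → List Char → Bool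
  | [], _ => true
  | _ :: _, [] => false
  | c :: cs, d :: ds =>
    if d < c then mergeScan (c :: cs) ds
    else if d = c then mergeScan cs ds
    else false

def helper_alt (s1 : String) (s2 : String) : Bool :=
  let t1 := PySem.List.sorted s1.toList (fun x => x) false
  let t2 := PySem.List.sorted s2.toList (fun x => x) false
  mergeScan t2 t1

-- ===== PRECONDITION & SPEC =====
def Spec_helper (s1 : String) (s2 : String) (out : Bool) : Prop := out = helper_alt s1 s2
instance (s1 : String) (s2 : String) (out : Bool) : Decidable (Spec_helper s1 s2 out) := by unfold Spec_helper; infer_instance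

-- ===== CLAIM (what is proved, stated in full; the proofs are below) =====
def Claim_equal_helper : Prop := ∀ (s1 : String) (s2 : String), Dom_helper s1 s2 → Spec_helper s1 s2 (helper s1 s2)

-- ===== LEMMAS AND PROOFS =====

theorem helperLoop_true_iff (c1 c2 : PySem.Dict Char Int) (ks : List Char) :
    helperLoop c1 c2 ks = true ↔ ∀ k ∈ ks, c2.getD k 0 ≤ c1.getD k 0 := by
  induction ks with
  | nil => simp [helperLoop]
  | cons k ks ih =>
    simp only [helperLoop, List.mem_cons]
    split_ifs with h
    · simp only [false_iff]
      intro hall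
      exact absurd (hall k (Or.inl rfl)) (by omega)
    · rw [ih]
      constructor
      · rintro hall x (rfl | hx)
        · omega
        · exact hall x hx
      · intro hall x hx
        exact hall x (Or.inr hx)

-- A's result characterised: every character count of s2 fits inside s1's.
theorem helper_true_iff (s1 s2 : String) :
    helper s1 s2 = true ↔
      ∀ c ∈ s2.toList, (s2.toList.count c : Int) ≤ (s1.toList.count c : Int) := by
  unfold helper
  rw [helperLoop_true_iff]
  simp [PySem.Dict.keys_counter, PySem.Dict.getD_counter, PySem.Set.mem_ofList]

-- The merge scan on two ascending lists decides the sub-multiset (Subperm) relation.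
theorem mergeScan_true_iff (t2 t1 : List Char)
    (h2 : t2.Pairwise (· ≤ ·)) (h1 : t1.Pairwise (· ≤ ·)) :
    mergeScan t2 t1 = true ↔ List.Subperm t2 t1 := by
  induction t1 generalizing t2 with
  | nil =>
    cases t2 with
    | nil => simp [mergeScan]
    | cons c cs => simp [mergeScan]
  | cons d ds ih =>
    cases t2 with
    | nil => simp [mergeScan, List.nil_subperm]
    | cons c cs =>
      have h1' : ds.Pairwise (· ≤ ·) := h1.tail
      simp only [mergeScan]
      split_ifs with hdc hde
      · -- d < c : d cannot be used by any element of c::cs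
        rw [ih (c :: cs) h2 h1']
        constructor
        · intro hsub
          exact hsub.trans (List.sublist_cons_self d ds).subperm
        · intro hsub
          rw [List.subperm_ext_iff] at hsub ⊢
          intro x hx
          have hxc : c ≤ x := by
            rcases List.mem_cons.mp hx with rfl | hx'
            · exact le_refl x
            · exact (List.pairwise_cons.mp h2).1 x hx'
          have hxd : x ≠ d := by
            intro h; rw [h] at hxc; exact absurd hdc (not_lt.mpr hxc)
          have := hsub x hx
          simpa [List.count_cons, Ne.symm hxd] using this
      · -- d = c : consume a match
        subst hde
        rw [ih cs h2.tail h1']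
        exact (List.subperm_cons d).symm
      · -- c < d : c occurs in c::cs but in no element of d::ds
        have hcd : c < d := lt_of_le_of_ne (not_lt.mp hdc) (Ne.symm hde)
        simp only [false_iff]
        intro hsub
        have hc : c ∈ d :: ds := hsub.subset (List.mem_cons_self ..)
        rcases List.mem_cons.mp hc with rfl | hc'
        · exact lt_irrefl c hcd
        · have : d ≤ c := (List.pairwise_cons.mp h1).1 c hc'
          exact absurd hcd (not_lt.mpr this)

-- counts are invariant under sorting (a permutation)
theorem count_sorted (xs : List Char) (c : Char) :
    (PySem.List.sorted xs (fun x => x) false).count c = xs.count c :=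
  (PySem.List.sorted_perm xs (fun x => x) false).count_eq c

theorem helper_alt_true_iff (s1 s2 : String) :
    helper_alt s1 s2 = true ↔
      ∀ c ∈ s2.toList, (s2.toList.count c : Int) ≤ (s1.toList.count c : Int) := by
  unfold helper_alt
  rw [mergeScan_true_iff _ _ (PySem.List.sorted_pairwise ..) (PySem.List.sorted_pairwise ..),
      List.subperm_ext_iff]
  constructor
  · intro h c hc
    have hc' : c ∈ PySem.List.sorted s2.toList (fun x => x) false :=
      (PySem.List.mem_sorted ..).mpr hc
    have := h c hc'
    rw [count_sorted, count_sorted] at this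
    exact_mod_cast this
  · intro h c hc
    have hc' : c ∈ s2.toList := (PySem.List.mem_sorted ..).mp hc
    have := h c hc'
    rw [count_sorted, count_sorted]
    exact_mod_cast this

theorem helper_eq_alt (s1 s2 : String) : helper s1 s2 = helper_alt s1 s2 := by
  rw [Bool.eq_iff_iff]
  exact (helper_true_iff s1 s2).trans (helper_alt_true_iff s1 s2).symm

-- ===== VERDICT (by name: the statement is the Claim_ definition above) =====
theorem helper_spec : Claim_equal_helper := by
  intro s1 s2 _
  unfold Spec_helper
  exact helper_eq_alt s1 s2
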